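-- pv_equiv track=rewrite | github.com/mat-1/protocol_wiki_helper | src/updaters/entity_metadata/main_entities_table.py | parse
-- ===== SOURCE A (Python) =====
-- def parse(lines: list[str]) -> tuple[dict, int, int]:
--     in_main_entities_table = False
--
--     table_start_i = None
--     table_end_i = None
--
--     entry_position = 0
--     entry_start_line = None
--     entry_width = None
--     entry_height = None
--
--     # { magma_cube: { start_line: '|-', width: '0.5202 * size', height: '0.5202 * size' }  }
--     entries = {}
--
--     for i, line in enumerate(lines):
--         if line == '{| class="wikitable"':
--             in_main_entities_table = True
--             table_start_i = i
--             continue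
--         if not in_main_entities_table:
--             continue
--
--         if line == '|}':
--             in_main_entities_table = False
--             table_end_i = i
--             break
--
--         if line.startswith('|-'):
--             entry_position = 0
--             entry_start_line = line
--             entry_width = None
--             entry_height = None
--         if entry_position == 1:
--             # protocol id
--             pass
--         elif entry_position == 2:
--             # display name
--             pass
--         elif entry_position == 3:
--             # width
--             entry_width = line[2:]
--         elif entry_position == 4:
--             # height
--             entry_height = line[2:]
--         elif entry_position == 5:
--             # resource id
--             entity_resource_id = line[2:].split(':')[-1].split('<')[0]
--             entries[entity_resource_id] = {
--                 'start_line': entry_start_line,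
--                 'width': entry_width,
--                 'height': entry_height,
--             }
--
--         entry_position += 1
--
--     return (entries, table_start_i, table_end_i)
-- ===== SOURCE B (Python) =====
-- START = '{| class="wikitable"'
--
--
-- def _record(entries, seg_start, seg):
--     if len(seg) >= 6:
--         rid = seg[5][2:].split(':')[-1].split('<')[0]
--         entries[rid] = {
--             'start_line': seg_start,
--             'width': seg[3][2:],
--             'height': seg[4][2:],
--         }
--
--
-- def parse(lines: list[str]) -> tuple[dict, int, int]:
--     if START not in lines:
--         return ({}, None, None)
--     start_i = lines.index(START)
--     rest = lines[start_i + 1:]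
--     end_off = rest.index('|}') if '|}' in rest else None
--     end_i = None if end_off is None else start_i + 1 + end_off
--     body = rest if end_off is None else rest[:end_off]
--     entries = {}
--     seg_start, seg = None, []
--     for line in body:
--         if line.startswith('|-'):
--             _record(entries, seg_start, seg)
--             seg_start, seg = line, [line]
--         else:
--             seg.append(line)
--     _record(entries, seg_start, seg)
--     return (entries, start_i, end_i)
-- ===== Notes on version B (the rewrite author's own statement) =====
-- stated objective: alternative
-- what changed: A's single pass with an in-table flag and a position counter is replaced by a decomposition: locate the table start and end markers, slice out the table body, split it into '|-'-delimited segments and read each segment's width/height/resource-id fields by position.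
-- intended difference: On inputs where the table-start marker line reappears after its first occurrence and before the next '|}' line, A returns the index of the last such marker as table_start_i (and skips that line from its row counter) while B returns the index of the first marker, the intended table start. — e.g. on parse(["{| class=\"wikitable\"", "{| class=\"wikitable\""]): A returns ([], some 1, none), B returns ([], some 0, none)
import Mathlib
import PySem

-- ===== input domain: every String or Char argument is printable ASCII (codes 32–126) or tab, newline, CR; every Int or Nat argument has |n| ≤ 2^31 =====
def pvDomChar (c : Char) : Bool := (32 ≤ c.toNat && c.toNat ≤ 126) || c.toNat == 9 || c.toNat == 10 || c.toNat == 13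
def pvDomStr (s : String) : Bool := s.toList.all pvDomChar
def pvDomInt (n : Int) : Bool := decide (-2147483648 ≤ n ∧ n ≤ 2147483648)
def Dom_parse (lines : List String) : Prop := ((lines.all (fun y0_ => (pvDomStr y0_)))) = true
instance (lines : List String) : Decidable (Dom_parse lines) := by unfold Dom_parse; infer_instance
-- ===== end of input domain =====

-- B rewrites A's single flag-and-counter pass as a decomposition: locate the table start/end
-- markers, slice out the body, split it into '|-'-segments and read each segment's fields by position.

-- ===== PORT A =====
-- line[2:].split(':')[-1].split('<')[0]  — split always returns a nonempty list, so [-1]/[0] are getLastD/headD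
def ridA (l : String) : String :=
  ((((PySem.Str.split? (PySem.Str.slice l (some 2) none) ":").getD []).getLastD "" |>
    (PySem.Str.split? · "<")).getD []).headD ""

-- the loop body once in_main_entities_table is true; 'break' returns directly
def parseInA (rest : List String) (i si pos : Int) (sl w h : Option String)
    (entries : PySem.Dict String (List (String × Option String))) :
    (List (String × List (String × Option String))) × Option Int × Option Int :=
  match rest with
  | [] => (entries.items, some si, none)
  | l :: r =>
    if l = "{| class=\"wikitable\"" then parseInA r (i+1) i pos sl w h entries
    else if l = "|}" then (entries.items, some si, some i)
    else
      -- the startswith('|-') reset, then the elif chain on entry_position, then entry_position += 1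
      let st := if PySem.Str.startswith l "|-" then ((0 : Int), some l, (none : Option String), (none : Option String))
                else (pos, sl, w, h)
      let pos' := st.1
      let sl' := st.2.1
      let w' := st.2.2.1
      let h' := st.2.2.2
      if pos' = 1 then parseInA r (i+1) si (pos'+1) sl' w' h' entries
      else if pos' = 2 then parseInA r (i+1) si (pos'+1) sl' w' h' entries
      else if pos' = 3 then parseInA r (i+1) si (pos'+1) sl' (some (PySem.Str.slice l (some 2) none)) h' entries
      else if pos' = 4 then parseInA r (i+1) si (pos'+1) sl' w' (some (PySem.Str.slice l (some 2) none)) entries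
      else if pos' = 5 then
        parseInA r (i+1) si (pos'+1) sl' w' h'
          (entries.insert (ridA l) [("start_line", sl'), ("width", w'), ("height", h')])
      else parseInA r (i+1) si (pos'+1) sl' w' h' entries

-- the loop while in_main_entities_table is still false
def parseFindA (lines : List String) (i : Int) :
    (List (String × List (String × Option String))) × Option Int × Option Int :=
  match lines with
  | [] => (([] : List (String × List (String × Option String))), none, none)
  | l :: r =>
    if l = "{| class=\"wikitable\"" then
      parseInA r (i+1) i 0 none none none PySem.Dict.empty
    else parseFindA r (i+1)

def parse (lines : List String) : (List (String × List (String × Option String))) × Option Int × Option Int :=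
  parseFindA lines 0

-- ===== PORT B =====
-- seg[5][2:].split(':')[-1].split('<')[0]
def ridB (l : String) : String :=
  ((((PySem.Str.split? (PySem.Str.slice l (some 2) none) ":").getD []).getLastD "" |>
    (PySem.Str.split? · "<")).getD []).headD ""

-- _record: seg[k] is in range when the length guard holds, so getD is exact
def recordB (entries : PySem.Dict String (List (String × Option String)))
    (segStart : Option String) (seg : List String) :
    PySem.Dict String (List (String × Option String)) :=
  if 6 ≤ seg.length then
    entries.insert (ridB (seg.getD 5 ""))
      [("start_line", segStart),
       ("width", some (PySem.Str.slice (seg.getD 3 "") (some 2) none)),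
       ("height", some (PySem.Str.slice (seg.getD 4 "") (some 2) none))]
  else entries

def parse_alt (lines : List String) : (List (String × List (String × Option String))) × Option Int × Option Int :=
  match PySem.List.index? lines "{| class=\"wikitable\"" with
  | none => (([] : List (String × List (String × Option String))), none, none)
  | some startI =>
    -- lines[start_i+1:] / rest[:end_off]: nonnegative in-range slices are drop/take
    let rest := lines.drop (startI + 1)
    let endOff := PySem.List.index? rest "|}"
    let endI : Option Int := endOff.map (fun (k : Nat) => (startI : Int) + 1 + (k : Int))
    let body := match endOff with
                | none => rest
                | some k => rest.take k
    let st := body.foldl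
      (fun (st : PySem.Dict String (List (String × Option String)) × Option String × List String) l =>
        if PySem.Str.startswith l "|-" then (recordB st.1 st.2.1 st.2.2, some l, [l])
        else (st.1, st.2.1, st.2.2 ++ [l]))
      (PySem.Dict.empty, none, ([] : List String))
    ((recordB st.1 st.2.1 st.2.2).items, some (startI : Int), endI)

-- ===== PRECONDITION & SPEC =====
-- On inputs where the table-start marker line reappears after its first occurrence and before the
-- next '|}' line, A returns the index of the LAST such marker as table_start_i (and skips the
-- marker line from its row counter), while B returns the index of the FIRST marker, the intended
-- table start; everywhere else A = B.
def D_parse (lines : List String) : Prop :=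
  (match PySem.List.index? lines "{| class=\"wikitable\"" with
   | none => false
   | some i =>
     match PySem.List.index? (lines.drop (i+1)) "|}" with
     | none => (lines.drop (i+1)).contains "{| class=\"wikitable\""
     | some k => ((lines.drop (i+1)).take k).contains "{| class=\"wikitable\"") = true
instance (lines : List String) : Decidable (D_parse lines) := by unfold D_parse; infer_instance

def Spec_parse (lines : List String) (out : (List (String × List (String × Option String))) × Option Int × Option Int) : Prop := ¬ D_parse lines → out = parse_alt lines
instance (lines : List String) (out : (List (String × List (String × Option String))) × Option Int × Option Int) : Decidable (Spec_parse lines out) := by unfold Spec_parse; infer_instance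

def pvDiffWitness_parse : List String := ["{| class=\"wikitable\"", "{| class=\"wikitable\""]
def pvDiffWitnessOut_parse : ((List (String × List (String × Option String))) × Option Int × Option Int) × ((List (String × List (String × Option String))) × Option Int × Option Int) :=
  (([], some 1, none), ([], some 0, none))

-- ===== CLAIM (what is proved, stated in full; the proofs are below) =====
def Claim_unchanged_parse : Prop := ∀ (lines : List String), Dom_parse lines → Spec_parse lines (parse lines)
def Claim_changed_parse : Prop := Dom_parse (pvDiffWitness_parse) ∧ D_parse (pvDiffWitness_parse) ∧ parse (pvDiffWitness_parse) = pvDiffWitnessOut_parse.1 ∧ parse_alt (pvDiffWitness_parse) = pvDiffWitnessOut_parse.2 ∧ pvDiffWitnessOut_parse.1 ≠ pvDiffWitnessOut_parse.2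
def Claim_exact_parse : Prop := ∀ (lines : List String), Dom_parse lines → D_parse lines → parse lines ≠ parse_alt lines

-- ===== LEMMAS AND PROOFS =====

-- proof-only helpers (not reachable from Spec_parse)
def wOf (seg : List String) : Option String := seg[3]?.map (fun s => PySem.Str.slice s (some 2) none)
def hOf (seg : List String) : Option String := seg[4]?.map (fun s => PySem.Str.slice s (some 2) none)

-- segment-level recursion bridging A's counter loop and B's phases
def G (rest : List String) (i si : Int) (ss : Option String) (seg : List String)
    (e : PySem.Dict String (List (String × Option String))) :
    (List (String × List (String × Option String))) × Option Int × Option Int :=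
  match rest with
  | [] => ((recordB e ss seg).items, some si, none)
  | l :: r =>
    if l = "{| class=\"wikitable\"" then G r (i+1) i ss seg e
    else if l = "|}" then ((recordB e ss seg).items, some si, some i)
    else if PySem.Str.startswith l "|-" then G r (i+1) si (some l) [l] (recordB e ss seg)
    else G r (i+1) si ss (seg ++ [l]) e

lemma pvGet_append_ne (seg : List String) (l : String) (k : Nat) (h : k ≠ seg.length) :
    (seg ++ [l])[k]? = seg[k]? := by
  rcases Nat.lt_or_ge k seg.length with hk | hk
  · exact List.getElem?_append_left hk
  · have hk' : seg.length < k := lt_of_le_of_ne hk (fun h' => h h'.symm)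
    rw [List.getElem?_append_right hk]
    rw [List.getElem?_eq_none (by simp; omega), List.getElem?_eq_none (by omega)]

lemma record_small (e : PySem.Dict String (List (String × Option String))) (ss : Option String)
    (seg : List String) (h : seg.length < 6) : recordB e ss seg = e := by
  unfold recordB
  rw [if_neg (by omega)]

lemma record_append (e : PySem.Dict String (List (String × Option String))) (ss : Option String)
    (seg : List String) (l : String) (h : seg.length ≠ 5) :
    recordB e ss (seg ++ [l]) = recordB e ss seg := by
  rcases Nat.lt_or_ge seg.length 6 with h6 | h6
  · rw [record_small _ _ _ (by simp; omega), record_small _ _ _ h6]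
  · unfold recordB
    rw [if_pos (by simp; omega), if_pos h6]
    have g : ∀ k : Nat, k < seg.length → (seg ++ [l]).getD k "" = seg.getD k "" := by
      intro k hk
      rw [List.getD, List.getD, pvGet_append_ne seg l k (by omega)]
    rw [g 3 (by omega), g 4 (by omega), g 5 (by omega)]

lemma A_eq_G (rest : List String) : ∀ (i si : Int) (ss : Option String) (seg : List String)
    (e : PySem.Dict String (List (String × Option String))),
    parseInA rest i si (seg.length : Int) ss (wOf seg) (hOf seg) (recordB e ss seg)
      = G rest i si ss seg e := by
  induction rest with
  | nil => intro i si ss seg e; rfl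
  | cons l r ih =>
    intro i si ss seg e
    by_cases h1 : l = "{| class=\"wikitable\""
    · simp only [parseInA, G, if_pos h1]
      exact ih (i+1) i ss seg e
    · by_cases h2 : l = "|}"
      · simp only [parseInA, G, if_neg h1, if_pos h2]
      · by_cases h3 : PySem.Str.startswith l "|-"
        · simp only [parseInA, G, if_neg h1, if_neg h2, if_pos h3]
          rw [← ih (i+1) si (some l) [l] (recordB e ss seg)]
          rw [record_small _ _ [l] (by simp)]
          norm_num [wOf, hOf]
        · simp only [parseInA, G, if_neg h1, if_neg h2, if_neg h3]
          rw [← ih (i+1) si ss (seg ++ [l]) e]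
          by_cases e3 : seg.length = 3
          · rw [if_neg (by omega), if_neg (by omega), if_pos (by exact_mod_cast congrArg Nat.cast e3)]
            have hw : wOf (seg ++ [l]) = some (PySem.Str.slice l (some 2) none) := by
              unfold wOf; rw [← e3, List.getElem?_concat_length]; rfl
            have hh : hOf (seg ++ [l]) = hOf seg := by
              unfold hOf; rw [pvGet_append_ne seg l 4 (by omega)]
            have hl : (((seg ++ [l]).length : Nat) : Int) = (seg.length : Int) + 1 := by
              simp
            rw [hw, hh, hl, record_append _ _ _ _ (by omega)]
          · by_cases e4 : seg.length = 4
            · rw [if_neg (by omega), if_neg (by omega), if_neg (by omega),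
                  if_pos (by exact_mod_cast congrArg Nat.cast e4)]
              have hw : wOf (seg ++ [l]) = wOf seg := by
                unfold wOf; rw [pvGet_append_ne seg l 3 (by omega)]
              have hh : hOf (seg ++ [l]) = some (PySem.Str.slice l (some 2) none) := by
                unfold hOf; rw [← e4, List.getElem?_concat_length]; rfl
              have hl : (((seg ++ [l]).length : Nat) : Int) = (seg.length : Int) + 1 := by
                simp
              rw [hw, hh, hl, record_append _ _ _ _ (by omega)]
            · by_cases e5 : seg.length = 5
              · rw [if_neg (by omega), if_neg (by omega), if_neg (by omega), if_neg (by omega),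
                    if_pos (by exact_mod_cast congrArg Nat.cast e5)]
                obtain ⟨x, hx⟩ : ∃ x, seg[3]? = some x := ⟨_, List.getElem?_eq_getElem (by omega)⟩
                obtain ⟨y, hy⟩ : ∃ y, seg[4]? = some y := ⟨_, List.getElem?_eq_getElem (by omega)⟩
                have hw : wOf (seg ++ [l]) = wOf seg := by
                  unfold wOf; rw [pvGet_append_ne seg l 3 (by omega)]
                have hh : hOf (seg ++ [l]) = hOf seg := by
                  unfold hOf; rw [pvGet_append_ne seg l 4 (by omega)]
                have hfl : recordB e ss (seg ++ [l]) = (recordB e ss seg).insert (ridA l)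
                    [("start_line", ss), ("width", wOf seg), ("height", hOf seg)] := by
                  unfold recordB
                  rw [if_pos (by simp; omega), if_neg (by omega)]
                  have g5 : (seg ++ [l]).getD 5 "" = l := by
                    rw [List.getD_eq_getElem?_getD, ← e5, List.getElem?_concat_length]; rfl
                  have g3 : (seg ++ [l]).getD 3 "" = x := by
                    rw [List.getD_eq_getElem?_getD, pvGet_append_ne seg l 3 (by omega), hx]; rfl
                  have g4 : (seg ++ [l]).getD 4 "" = y := by
                    rw [List.getD_eq_getElem?_getD, pvGet_append_ne seg l 4 (by omega), hy]; rfl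
                  have hr : ridB (l) = ridA (l) := rfl
                  rw [g5, g3, g4, hr]
                  simp [wOf, hOf, hx, hy]
                have hl : (((seg ++ [l]).length : Nat) : Int) = (seg.length : Int) + 1 := by
                  simp
                rw [hw, hh, hl, hfl, record_small _ _ _ (by omega)]
              · have hw : wOf (seg ++ [l]) = wOf seg := by
                  unfold wOf; rw [pvGet_append_ne seg l 3 (by omega)]
                have hh : hOf (seg ++ [l]) = hOf seg := by
                  unfold hOf; rw [pvGet_append_ne seg l 4 (by omega)]
                have hl : (((seg ++ [l]).length : Nat) : Int) = (seg.length : Int) + 1 := by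
                  simp
                rw [hw, hh, hl, record_append _ _ _ _ (by omega)]
                split_ifs <;> first | rfl | omega

def stepB (st : PySem.Dict String (List (String × Option String)) × Option String × List String)
    (l : String) : PySem.Dict String (List (String × Option String)) × Option String × List String :=
  if PySem.Str.startswith l "|-" then (recordB st.1 st.2.1 st.2.2, some l, [l])
  else (st.1, st.2.1, st.2.2 ++ [l])

def bodyOf (rest : List String) : List String :=
  match PySem.List.index? rest "|}" with
  | none => rest
  | some k => rest.take k

lemma bodyOf_end (r : List String) : bodyOf ("|}" :: r) = [] := by
  unfold bodyOf; rw [PySem.List.index?_cons_self]; rfl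

lemma bodyOf_cons (l : String) (r : List String) (h : l ≠ "|}") :
    bodyOf (l :: r) = l :: bodyOf r := by
  unfold bodyOf; rw [PySem.List.index?_cons_of_ne r h]
  cases PySem.List.index? r "|}" <;> simp

lemma endOf_cons (l : String) (r : List String) (i : Int) (h : l ≠ "|}") :
    (PySem.List.index? (l :: r) "|}").map (fun (k : Nat) => i + (k : Int))
      = (PySem.List.index? r "|}").map (fun (k : Nat) => (i + 1) + (k : Int)) := by
  rw [PySem.List.index?_cons_of_ne r h]
  cases PySem.List.index? r "|}" <;> simp
  omega

-- outside D_, the table start marker does not reappear inside the table body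
lemma G_eq (rest : List String) : ∀ (i si : Int) (ss : Option String) (seg : List String)
    (e : PySem.Dict String (List (String × Option String))),
    "{| class=\"wikitable\"" ∉ bodyOf rest →
    G rest i si ss seg e =
      ((recordB ((bodyOf rest).foldl stepB (e, ss, seg)).1
          ((bodyOf rest).foldl stepB (e, ss, seg)).2.1
          ((bodyOf rest).foldl stepB (e, ss, seg)).2.2).items,
       some si,
       (PySem.List.index? rest "|}").map (fun (k : Nat) => i + (k : Int))) := by
  induction rest with
  | nil => intro i si ss seg e _; rfl
  | cons l r ih =>
    intro i si ss seg e hno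
    by_cases h2 : l = "|}"
    · subst h2
      rw [G, bodyOf_end, PySem.List.index?_cons_self]
      rw [if_neg (by decide), if_pos rfl]
      norm_num
    · rw [bodyOf_cons l r h2] at hno
      have h1 : l ≠ "{| class=\"wikitable\"" := fun h => hno (by simp [h])
      have hno' : "{| class=\"wikitable\"" ∉ bodyOf r := fun h => hno (List.mem_cons_of_mem _ h)
      rw [bodyOf_cons l r h2, endOf_cons l r i h2, List.foldl_cons]
      by_cases h3 : PySem.Str.startswith l "|-"
      · rw [G, if_neg h1, if_neg h2, if_pos h3, ih (i+1) si (some l) [l] (recordB e ss seg) hno']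
        rw [show stepB (e, ss, seg) l = (recordB e ss seg, some l, [l]) from by
          rw [stepB, if_pos h3]]
      · rw [G, if_neg h1, if_neg h2, if_neg h3, ih (i+1) si ss (seg ++ [l]) e hno']
        rw [show stepB (e, ss, seg) l = (e, ss, seg ++ [l]) from by
          rw [stepB, if_neg h3]]

lemma find_eq (lines : List String) : ∀ i : Int,
    parseFindA lines i =
      match PySem.List.index? lines "{| class=\"wikitable\"" with
      | none => (([] : List (String × List (String × Option String))), none, none)
      | some k => parseInA (lines.drop (k+1)) (i + k + 1) (i + k) 0 none none none PySem.Dict.empty := by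
  induction lines with
  | nil => intro i; rfl
  | cons l r ih =>
    intro i
    by_cases h1 : l = "{| class=\"wikitable\""
    · subst h1
      rw [parseFindA, if_pos rfl, PySem.List.index?_cons_self]
      norm_num
    · rw [parseFindA, if_neg h1, ih (i+1), PySem.List.index?_cons_of_ne r h1]
      cases ho : PySem.List.index? r "{| class=\"wikitable\"" with
      | none => rfl
      | some k =>
        simp only [Option.map_some]
        have e1 : i + 1 + (k : Int) + 1 = i + ((k+1 : Nat) : Int) + 1 := by push_cast; ring
        have e2 : i + 1 + (k : Int) = i + ((k+1 : Nat) : Int) := by push_cast; ring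
        rw [e1, e2, show (l :: r).drop ((k+1)+1) = r.drop (k+1) from by simp]

-- D_ at a found first marker says exactly: the marker reappears inside the body
lemma D_iff (lines : List String) (first : Nat)
    (hfi : PySem.List.index? lines "{| class=\"wikitable\"" = some first) :
    D_parse lines ↔ "{| class=\"wikitable\"" ∈ bodyOf (lines.drop (first+1)) := by
  unfold D_parse bodyOf
  rw [hfi, PySem.List.index?_eq_idxOf?]
  cases h : List.idxOf? "|}" (lines.drop (first+1)) <;>
    simp [h, PySem.List.index?_eq_idxOf?]

-- A's table_start_i is the latest marker index seen: always the initial one or ≥ the running index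
lemma G_si (rest : List String) : ∀ (i si : Int) (ss : Option String) (seg : List String)
    (e : PySem.Dict String (List (String × Option String))),
    ∃ s, (G rest i si ss seg e).2.1 = some s ∧ (s = si ∨ i ≤ s) := by
  induction rest with
  | nil => intro i si ss seg e; exact ⟨si, rfl, Or.inl rfl⟩
  | cons l r ih =>
    intro i si ss seg e
    by_cases h1 : l = "{| class=\"wikitable\""
    · rw [G, if_pos h1]
      obtain ⟨s, hs, hd⟩ := ih (i+1) i ss seg e
      exact ⟨s, hs, Or.inr (by omega)⟩
    · by_cases h2 : l = "|}"
      · rw [G, if_neg h1, if_pos h2]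
        exact ⟨si, rfl, Or.inl rfl⟩
      · by_cases h3 : PySem.Str.startswith l "|-"
        · rw [G, if_neg h1, if_neg h2, if_pos h3]
          obtain ⟨s, hs, hd⟩ := ih (i+1) si (some l) [l] (recordB e ss seg)
          exact ⟨s, hs, by omega⟩
        · rw [G, if_neg h1, if_neg h2, if_neg h3]
          obtain ⟨s, hs, hd⟩ := ih (i+1) si ss (seg ++ [l]) e
          exact ⟨s, hs, by omega⟩

-- with a marker inside the body, A's table_start_i is strictly beyond the initial one
lemma G_si_mem (rest : List String) : ∀ (i si : Int) (ss : Option String) (seg : List String)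
    (e : PySem.Dict String (List (String × Option String))),
    "{| class=\"wikitable\"" ∈ bodyOf rest →
    ∃ s, (G rest i si ss seg e).2.1 = some s ∧ i ≤ s := by
  induction rest with
  | nil => intro i si ss seg e h; exact absurd h (by simp [bodyOf, PySem.List.index?])
  | cons l r ih =>
    intro i si ss seg e hmem
    by_cases h2 : l = "|}"
    · subst h2; rw [bodyOf_end] at hmem; exact absurd hmem (by simp)
    · rw [bodyOf_cons l r h2] at hmem
      by_cases h1 : l = "{| class=\"wikitable\""
      · rw [G, if_pos h1]
        obtain ⟨s, hs, hd⟩ := G_si r (i+1) i ss seg e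
        exact ⟨s, hs, by omega⟩
      · have hmem' : "{| class=\"wikitable\"" ∈ bodyOf r := by
          cases hmem with
          | head => exact absurd rfl (Ne.symm h1 ∘ Eq.symm)
          | tail _ h => exact h
        by_cases h3 : PySem.Str.startswith l "|-"
        · rw [G, if_neg h1, if_neg h2, if_pos h3]
          obtain ⟨s, hs, hd⟩ := ih (i+1) si (some l) [l] (recordB e ss seg) hmem'
          exact ⟨s, hs, by omega⟩
        · rw [G, if_neg h1, if_neg h2, if_neg h3]
          obtain ⟨s, hs, hd⟩ := ih (i+1) si ss (seg ++ [l]) e hmem'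
          exact ⟨s, hs, by omega⟩

lemma parse_as_G (lines : List String) (first : Nat)
    (hfi : PySem.List.index? lines "{| class=\"wikitable\"" = some first) :
    parse lines = G (lines.drop (first+1)) ((first:Int)+1) (first:Int) none [] PySem.Dict.empty := by
  unfold parse
  rw [find_eq lines 0, hfi]
  simp only []
  have e1 : (0:Int) + (first:Int) + 1 = (first:Int) + 1 := by ring
  have e2 : (0:Int) + (first:Int) = (first:Int) := by ring
  rw [e1, e2]
  exact A_eq_G (lines.drop (first+1)) ((first:Int)+1) (first:Int) none [] PySem.Dict.empty

-- ===== VERDICT (by name: the statement is the Claim_ definition above) =====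
theorem parse_spec : Claim_unchanged_parse := by
  intro lines _ hnd
  show parse lines = parse_alt lines
  cases hfi : PySem.List.index? lines "{| class=\"wikitable\"" with
  | none =>
    unfold parse parse_alt
    rw [find_eq lines 0, hfi]
  | some first =>
    have hno : "{| class=\"wikitable\"" ∉ bodyOf (lines.drop (first+1)) :=
      fun h => hnd ((D_iff lines first hfi).mpr h)
    rw [parse_as_G lines first hfi, G_eq _ _ _ _ _ _ hno]
    unfold parse_alt
    rw [hfi]
    rfl

theorem parse_changed : Claim_changed_parse := by
  unfold Claim_changed_parse
  refine ⟨?_, ?_, ?_, ?_, ?_⟩ <;> decide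

theorem parse_tight : Claim_exact_parse := by
  intro lines _ hd heq
  cases hfi : PySem.List.index? lines "{| class=\"wikitable\"" with
  | none => unfold D_parse at hd; rw [hfi] at hd; simp at hd
  | some first =>
    obtain ⟨s, hs, hge⟩ := G_si_mem (lines.drop (first+1)) ((first:Int)+1) (first:Int) none []
      PySem.Dict.empty ((D_iff lines first hfi).mp hd)
    rw [← parse_as_G lines first hfi] at hs
    have hb : (parse_alt lines).2.1 = some (first : Int) := by
      unfold parse_alt; rw [hfi]
    rw [heq, hb] at hs
    have := Option.some.inj hs
    omega
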